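-- pv_equiv track=rewrite | github.com/eliottcassidy2000/math | 04-computation/grinberg_stanley_UT_v3.py | apply_omega
-- ===== SOURCE A (Python) =====
-- def apply_omega(UT):
--     """Apply the omega involution: p_k -> (-1)^{k-1} p_k."""
--     result = {}
--     for partition, coeff in UT.items():
--         sign = 1
--         for k in partition:
--             sign *= (-1)**(k-1)
--         result[partition] = coeff * sign
--     return result
-- ===== SOURCE B (Python) =====
-- def apply_omega(UT):
--     """Apply the omega involution: p_k -> (-1)^{k-1} p_k."""
--     def sign(p):
--         return 1 if not p else sign(p[1:]) * (-1) ** (p[0] - 1)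
--     return {p: c * sign(p) for p, c in UT.items()}
-- ===== Notes on version B (the rewrite author's own statement) =====
-- stated objective: alternative
-- what changed: Both loops are re-decomposed: the mutable sign accumulator becomes a recursive sign helper (right-associated product) and the result dict is built by a single dict comprehension instead of item-by-item assignment in a for loop; a closed-form parity sign was deliberately not used because it cannot reproduce Python's exact int/float result of (-1)**(k-1) for parts k < 1.
-- outside the precondition, e.g. on apply_omega({(0,): 2}): A returns {(0,): -2.0}, B returns {(0,): -2.0}
import Mathlib
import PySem

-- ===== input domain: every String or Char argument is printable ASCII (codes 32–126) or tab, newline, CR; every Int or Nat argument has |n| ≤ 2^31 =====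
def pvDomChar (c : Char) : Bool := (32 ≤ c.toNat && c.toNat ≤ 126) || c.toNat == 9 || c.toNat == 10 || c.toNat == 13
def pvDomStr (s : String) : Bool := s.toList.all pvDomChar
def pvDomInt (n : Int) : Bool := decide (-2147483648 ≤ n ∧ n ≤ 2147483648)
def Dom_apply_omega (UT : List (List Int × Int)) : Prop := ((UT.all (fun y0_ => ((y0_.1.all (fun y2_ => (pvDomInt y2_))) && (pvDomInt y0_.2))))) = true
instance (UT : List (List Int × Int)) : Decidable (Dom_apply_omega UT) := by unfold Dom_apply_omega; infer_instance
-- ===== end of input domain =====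

-- B re-decomposes A: the mutable-accumulator inner loop becomes a recursive sign helper and the
-- result dict is one dict comprehension (alternative decomposition, same cost).

-- ===== PORT A =====
-- dict 'result' built by insertion; Python's (-1)**(k-1) has value 1 if k-1 is even else -1 for
-- EVERY integer k (it is that same ±1 as a float when k < 1 — excluded by Pre_), so the factor is
-- ported by the parity of k-1, exact in value for every k.
def apply_omega (UT : List (List Int × Int)) : List (List Int × Int) :=
  (UT.foldl
    (fun (result : PySem.Dict (List Int) Int) pc =>
      let sign : Int := pc.1.foldl (fun s k => s * (if (k - 1) % 2 = 0 then 1 else -1)) 1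
      result.insert pc.1 (pc.2 * sign))
    PySem.Dict.empty).items

-- ===== PORT B =====
-- recursive helper 'sign' (Source B's sign, with the same parity port of (-1)**(k-1) as above)
def pySign : List Int → Int
  | [] => 1
  | k :: rest => pySign rest * (if (k - 1) % 2 = 0 then 1 else -1)

-- dict comprehension: one insertion per item of UT
def apply_omega_alt (UT : List (List Int × Int)) : List (List Int × Int) :=
  (UT.foldl
    (fun (result : PySem.Dict (List Int) Int) pc =>
      result.insert pc.1 (pc.2 * pySign pc.1))
    PySem.Dict.empty).items

-- ===== PRECONDITION & SPEC =====
-- Pre_ excludes inputs containing a partition with a part k < 1: there Python's (-1)**(k-1) is a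
-- float, so both A's and B's results are floats (not values of the declared int type).
def Pre_apply_omega (UT : List (List Int × Int)) : Prop :=
  (UT.all (fun pc => pc.1.all (fun k => 1 ≤ k))) = true
instance (UT : List (List Int × Int)) : Decidable (Pre_apply_omega UT) := by
  unfold Pre_apply_omega; infer_instance
def pvWitness_apply_omega : (List (List Int × Int)) := [([1, 2], 3), ([2], -1)]
def Spec_apply_omega (UT : List (List Int × Int)) (out : List (List Int × Int)) : Prop := out = apply_omega_alt UT
instance (UT : List (List Int × Int)) (out : List (List Int × Int)) : Decidable (Spec_apply_omega UT out) := by unfold Spec_apply_omega; infer_instance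

-- ===== CLAIM (what is proved, stated in full; the proofs are below) =====
def Claim_equal_apply_omega : Prop := ∀ (UT : List (List Int × Int)), Dom_apply_omega UT → Pre_apply_omega UT → Spec_apply_omega UT (apply_omega UT)

-- ===== LEMMAS AND PROOFS =====

theorem foldl_cong_mem {α β : Type} (l : List α) (f g : β → α → β) (init : β)
    (h : ∀ x ∈ l, ∀ acc, f acc x = g acc x) : l.foldl f init = l.foldl g init := by
  induction l generalizing init with
  | nil => rfl
  | cons x xs ih =>
    simp only [List.foldl_cons]
    rw [h x (List.mem_cons_self) init]
    exact ih _ (fun y hy acc => h y (List.mem_cons_of_mem _ hy) acc)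

-- A's left fold of sign factors equals B's right-associated recursive product
theorem sign_foldl_eq_pySign (l : List Int) : ∀ (s : Int),
    l.foldl (fun s k => s * (if (k - 1) % 2 = 0 then 1 else -1)) s = s * pySign l := by
  induction l with
  | nil => intro s; simp [pySign]
  | cons k xs ih =>
    intro s
    simp only [List.foldl_cons, pySign]
    rw [ih]
    ring

-- ===== VERDICT (by name: the statement is the Claim_ definition above) =====
theorem apply_omega_spec : Claim_equal_apply_omega := by
  intro UT _ _
  unfold Spec_apply_omega apply_omega apply_omega_alt
  congr 1
  apply foldl_cong_mem
  intro pc _ acc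
  rw [sign_foldl_eq_pySign, one_mul]
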